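-- pv_equiv track=rewrite | github.com/RichardBTon/Kjemisk-Python | Prosjekt PMX, kjemi.py | read_Ka_data
-- ===== SOURCE A (Python) =====
-- def read_Ka_data(Ka_data):
--     """Leser dataen i Data Ka.txt"""
--     org_syrer = []
--     org_baser = []
--     Kaer_org_strings = []
--
--     for i, line in enumerate(Ka_data):
--         if i % 10 == 0:
--             chunk = Ka_data[i:i + 10]
--             Kaer_org_strings.append(chunk[0])
--             org_syrer.append(chunk[4])
--             org_baser.append(chunk[6])
--
--     return org_syrer, org_baser, Kaer_org_strings
-- ===== SOURCE B (Python) =====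
-- def read_Ka_data(Ka_data):
--     """Leser dataen i Data Ka.txt"""
--     org_syrer = []
--     org_baser = []
--     Kaer_org_strings = []
--
--     it = iter(Ka_data)
--     for name in it:
--         Kaer_org_strings.append(name)
--         block = [next(it) for _ in range(6)]
--         org_syrer.append(block[3])
--         org_baser.append(block[5])
--         for _ in range(3):
--             next(it, None)
--
--     return org_syrer, org_baser, Kaer_org_strings
-- ===== Notes on version B (the rewrite author's own statement) =====
-- stated objective: alternative
-- what changed: Replaces A's indexed enumerate+modulo pass that slices a 10-line chunk out of the list per record with a streaming single pass over one shared iterator: pull the record name, materialize the next 6 lines, read fields from that block, skip 3 lines; no indexing into Ka_data at all.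
import Mathlib
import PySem

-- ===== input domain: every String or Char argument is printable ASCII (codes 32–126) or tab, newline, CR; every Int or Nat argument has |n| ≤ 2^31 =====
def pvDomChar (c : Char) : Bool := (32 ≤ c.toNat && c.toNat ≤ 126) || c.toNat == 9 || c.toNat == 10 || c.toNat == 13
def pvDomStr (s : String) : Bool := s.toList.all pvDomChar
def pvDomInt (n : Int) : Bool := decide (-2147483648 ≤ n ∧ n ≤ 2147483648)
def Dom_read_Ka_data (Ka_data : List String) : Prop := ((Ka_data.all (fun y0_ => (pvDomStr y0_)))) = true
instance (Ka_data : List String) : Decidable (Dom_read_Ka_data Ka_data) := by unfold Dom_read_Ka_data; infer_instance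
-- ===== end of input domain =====

-- B replaces A's indexed enumerate+modulo+chunk-slice pass with a streaming single pass that
-- consumes an iterator: take the record name, pull the next 6 lines, skip 3 (alternative decomposition).


-- ===== PORT A =====
-- chunk[k] (k = 0,4,6) raises IndexError in Python on a short final chunk; ported with
-- pyGetD, exact on Pre_ (which excludes exactly those inputs).
def read_Ka_data (Ka_data : List String) : List String × List String × List String :=
  (PySem.List.enumerate Ka_data).foldl
    (fun (acc : List String × List String × List String) p =>
      if PySem.Int.mod p.1 10 == 0 then
        let chunk := PySem.List.slice Ka_data (some p.1) (some (p.1 + 10))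
        (acc.1 ++ [PySem.List.pyGetD chunk 4 ""],
         acc.2.1 ++ [PySem.List.pyGetD chunk 6 ""],
         acc.2.2 ++ [PySem.List.pyGetD chunk 0 ""])
      else acc)
    ([], [], [])

-- ===== PORT B =====
-- B's 'for name in it' loop over the shared iterator is this recursion: take the head,
-- 'block = [next(it) for _ in range(6)]' is rest.take 6 (next raises on exhaustion, block[3]/[5]
-- raise IndexError on a short block — outside Pre_, ported with pyGetD defaults), and the three
-- 'next(it, None)' skips make the loop resume at rest.drop 9; exact on Pre_.
def read_Ka_data_alt_go : List String → List String × List String × List String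
  | [] => ([], [], [])
  | _name :: rest =>
    let block := rest.take 6
    let r := read_Ka_data_alt_go (rest.drop 9)
    (PySem.List.pyGetD block 3 "" :: r.1,
     PySem.List.pyGetD block 5 "" :: r.2.1,
     _name :: r.2.2)
termination_by l => l.length
decreasing_by simp

def read_Ka_data_alt (Ka_data : List String) : List String × List String × List String :=
  read_Ka_data_alt_go Ka_data

-- ===== PRECONDITION & SPEC =====
-- Pre_ excludes exactly the inputs on which Python A raises IndexError (a final chunk of
-- fewer than 7 lines, i.e. len % 10 in 1..6); both A and B raise there.
def Pre_read_Ka_data (Ka_data : List String) : Prop :=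
  Ka_data.length % 10 = 0 ∨ 7 ≤ Ka_data.length % 10
instance (Ka_data : List String) : Decidable (Pre_read_Ka_data Ka_data) := by
  unfold Pre_read_Ka_data; infer_instance
def pvWitness_read_Ka_data : List String :=
  ["a0", "a1", "a2", "a3", "a4", "a5", "a6", "a7", "a8", "a9"]

def Spec_read_Ka_data (Ka_data : List String) (out : List String × List String × List String) : Prop := out = read_Ka_data_alt Ka_data
instance (Ka_data : List String) (out : List String × List String × List String) : Decidable (Spec_read_Ka_data Ka_data out) := by unfold Spec_read_Ka_data; infer_instance

-- ===== CLAIM (what is proved, stated in full; the proofs are below) =====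
def Claim_equal_read_Ka_data : Prop := ∀ (Ka_data : List String), Dom_read_Ka_data Ka_data → Pre_read_Ka_data Ka_data → Spec_read_Ka_data Ka_data (read_Ka_data Ka_data)

-- ===== LEMMAS AND PROOFS =====

-- Common characterization target: the three record fields, read at stride-10 offsets.
def tgt (xs : List String) (off : Nat) : List String :=
  (List.range ((xs.length + 9) / 10)).map (fun k => xs.getD (k * 10 + off) "")

-- The triple-accumulator append-if fold is the triple of filtered maps.
theorem foldl3_append_if {α : Type} (l : List α) (P : α → Bool)
    (f g h : α → String) (a b c : List String) :
    l.foldl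
      (fun (acc : List String × List String × List String) p =>
        if P p then (acc.1 ++ [f p], acc.2.1 ++ [g p], acc.2.2 ++ [h p]) else acc)
      (a, b, c)
    = (a ++ (l.filter P).map f, b ++ (l.filter P).map g, c ++ (l.filter P).map h) := by
  induction l generalizing a b c with
  | nil => simp
  | cons x xs ih =>
    by_cases hx : P x <;> simp [hx, ih]

-- A filtered map over pairs that only looks at the first components.
theorem filter_map_fst {α β : Type} (l : List (α × β)) (Q : α → Bool) (F : α → String) :
    ((l.filter (fun p => Q p.1)).map (fun p => F p.1))
    = ((l.map (fun p => p.1)).filter Q).map F := by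
  rw [List.filter_map, List.map_map]
  rfl

-- Multiples of 10 below n, as a filtered range.
theorem filter_range_ten (n : Nat) :
    (List.range n).filter (fun k => k % 10 == 0)
    = (List.range ((n + 9) / 10)).map (· * 10) := by
  induction n with
  | zero => simp
  | succ n ih =>
    rw [List.range_succ, List.filter_append, ih]
    by_cases h : n % 10 = 0
    · have h1 : (n + 1 + 9) / 10 = (n + 9) / 10 + 1 := by omega
      have h2 : (n + 9) / 10 * 10 = n := by omega
      simp [h, h1, List.range_succ, h2]
    · have h1 : (n + 1 + 9) / 10 = (n + 9) / 10 := by omega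
      simp [h, h1]

-- A's pre-filter index list equals the mapped Nat range, with the Python mod test resolved.
theorem filter_pyRange_one (n : Nat) :
    (PySem.List.pyRange 0 ((0 : Int) + (n : Int)) 1).filter
      (fun i => PySem.Int.mod i 10 == 0)
    = (List.range ((n + 9) / 10)).map (fun k : Nat => ((k * 10 : Nat) : Int)) := by
  rw [zero_add, PySem.List.pyRange_one]
  have h1 : (List.map (fun k : Nat => (0 : Int) + (k : Int)) (List.range ((n : Int) - 0).toNat))
      = List.map (fun k : Nat => ((k : Nat) : Int)) (List.range n) := by
    simp
  rw [h1, List.filter_map]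
  have h2 : ((fun i : Int => PySem.Int.mod i 10 == 0) ∘ (fun k : Nat => ((k : Nat) : Int)))
      = (fun k : Nat => k % 10 == 0) := by
    funext k
    have hmod : PySem.Int.mod ((k : Nat) : Int) 10 = ((k % 10 : Nat) : Int) := by
      exact_mod_cast PySem.Int.mod_natCast k 10
    simp only [Function.comp, hmod]
    by_cases hk : k % 10 = 0
    · simp [hk]
    · simp [hk]; omega
  rw [h2, filter_range_ten, List.map_map]
  apply List.map_congr_left
  intro k _
  simp

-- Indexing into the 10-line chunk equals direct indexing, for offsets below 10.
theorem chunk_get (xs : List String) (m k : Nat) (hk : k < 10) :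
    PySem.List.pyGetD
      (PySem.List.slice xs (some ((m : Nat) : Int)) (some (((m : Nat) : Int) + 10)))
      ((k : Nat) : Int) ""
    = xs.getD (m + k) "" := by
  have hb : ((m : Nat) : Int) + 10 = (((m + 10 : Nat) : Nat) : Int) := by push_cast; ring
  rw [hb, PySem.List.slice_natCast, PySem.List.pyGetD_natCast]
  simp [List.getD_eq_getElem?_getD, List.getElem?_drop, hk]

-- A computes the three stride-10 field lists.
theorem A_char (xs : List String) :
    read_Ka_data xs = (tgt xs 4, tgt xs 6, tgt xs 0) := by
  unfold read_Ka_data tgt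
  rw [foldl3_append_if]
  simp only [List.nil_append]
  rw [filter_map_fst (PySem.List.enumerate xs) (fun i => PySem.Int.mod i 10 == 0)
        (fun i => PySem.List.pyGetD (PySem.List.slice xs (some i) (some (i + 10))) 4 ""),
      filter_map_fst (PySem.List.enumerate xs) (fun i => PySem.Int.mod i 10 == 0)
        (fun i => PySem.List.pyGetD (PySem.List.slice xs (some i) (some (i + 10))) 6 ""),
      filter_map_fst (PySem.List.enumerate xs) (fun i => PySem.Int.mod i 10 == 0)
        (fun i => PySem.List.pyGetD (PySem.List.slice xs (some i) (some (i + 10))) 0 ""),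
      PySem.List.map_fst_enumerate, filter_pyRange_one]
  refine Prod.ext ?_ (Prod.ext ?_ ?_) <;>
    · dsimp only
      simp only [List.map_map]
      apply List.map_congr_left
      intro k _
      simp only [Function.comp]
      first
        | simpa using chunk_get xs (k * 10) 4 (by omega)
        | simpa using chunk_get xs (k * 10) 6 (by omega)
        | simpa using chunk_get xs (k * 10) 0 (by omega)

-- B computes the same three stride-10 field lists, by induction along B's recursion
-- (strong induction on the length, stepping by the consumed block).
theorem B_char_aux (n : Nat) : ∀ xs : List String, xs.length ≤ n →
    read_Ka_data_alt_go xs = (tgt xs 4, tgt xs 6, tgt xs 0) := by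
  induction n with
  | zero =>
    intro xs h
    have hx : xs = [] := List.eq_nil_of_length_eq_zero (by omega)
    subst hx
    simp [read_Ka_data_alt_go, tgt]
  | succ n ih =>
    intro xs h
    match xs with
    | [] => simp [read_Ka_data_alt_go, tgt]
    | name :: rest =>
      rw [read_Ka_data_alt_go, ih (rest.drop 9) (by simp at h ⊢; omega)]
      have hN : ((name :: rest).length + 9) / 10
          = (((rest.drop 9).length + 9) / 10) + 1 := by
        simp [List.length_drop]; omega
      have hstep : ∀ off : Nat, off < 10 →
          tgt (name :: rest) off
          = (name :: rest).getD off "" :: tgt (rest.drop 9) off := by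
        intro off hoff
        unfold tgt
        rw [hN, List.range_succ_eq_map, List.map_cons, List.map_map]
        congr 1
        · norm_num
        apply List.map_congr_left
        intro k _
        simp only [Function.comp]
        have h1 : Nat.succ k * 10 + off = (9 + (k * 10 + off)) + 1 := by omega
        rw [h1]
        simp [List.getD_eq_getElem?_getD, List.getElem?_drop]
      rw [hstep 4 (by omega), hstep 6 (by omega), hstep 0 (by omega)]
      refine Prod.ext ?_ (Prod.ext ?_ ?_) <;>
        simp [PySem.List.pyGetD_ofNat', List.getD_eq_getElem?_getD,
          List.getElem?_take_of_lt]

theorem B_char (xs : List String) :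
    read_Ka_data_alt_go xs = (tgt xs 4, tgt xs 6, tgt xs 0) :=
  B_char_aux xs.length xs le_rfl

-- ===== VERDICT (by name: the statement is the Claim_ definition above) =====
theorem read_Ka_data_spec : Claim_equal_read_Ka_data := by
  intro Ka_data _ _
  unfold Spec_read_Ka_data read_Ka_data_alt
  rw [A_char, B_char]
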